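-- pv_equiv track=rewrite | github.com/szufix/mapel | mapel-roommates/src/mapel/roommates/cultures/euclidean.py | generate_roommates_mutual_disagreement
-- ===== SOURCE A (Python) =====
-- def rotate(l, n):
--     return l[n:] + l[:n]
--
-- def generate_roommates_mutual_disagreement(num_agents: int = None, dim: int = 2, **kwargs):
--     master_list = [[(num_agents-1 -i)] for i in range(num_agents)]
--     out = [[-1] * (num_agents-1)] * num_agents
--     for i in range(num_agents):
--         remove_itself = master_list.copy()
--         remove_itself.remove([i])
--         out[i] = remove_itself
--         master_list = rotate(master_list, -1)
--     return out
-- ===== SOURCE B (Python) =====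
-- def generate_roommates_mutual_disagreement(num_agents: int = None, dim: int = 2, **kwargs):
--     # closed form: row i, column j holds the single agent num_agents-1-((j-i) % num_agents)
--     return [[[num_agents - 1 - ((j - i) % num_agents)] for j in range(num_agents - 1)]
--             for i in range(num_agents)]
-- ===== Notes on version B (the rewrite author's own statement) =====
-- stated objective: simpler
-- what changed: Replaces the rotate/copy/remove loop over a running master list by a direct closed-form comprehension computing each cell from (i, j) with modular arithmetic.
import Mathlib
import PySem

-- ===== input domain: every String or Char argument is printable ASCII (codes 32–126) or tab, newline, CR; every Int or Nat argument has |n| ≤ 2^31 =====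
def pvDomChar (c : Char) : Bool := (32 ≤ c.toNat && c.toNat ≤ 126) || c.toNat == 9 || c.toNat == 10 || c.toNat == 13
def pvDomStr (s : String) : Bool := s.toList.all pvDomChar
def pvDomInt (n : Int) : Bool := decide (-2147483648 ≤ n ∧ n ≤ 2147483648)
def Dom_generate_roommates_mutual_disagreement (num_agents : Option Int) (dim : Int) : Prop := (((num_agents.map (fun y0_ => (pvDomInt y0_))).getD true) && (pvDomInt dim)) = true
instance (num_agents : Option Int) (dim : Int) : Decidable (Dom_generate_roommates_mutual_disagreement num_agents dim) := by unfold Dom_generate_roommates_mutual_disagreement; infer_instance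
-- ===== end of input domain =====

-- B replaces A's rotate/copy/remove loop by a closed-form modular formula per cell (simpler; same cost).


-- ===== PORT A =====
-- rotate(l, n) = l[n:] + l[:n]
def pvRotate (l : List (List Int)) (n : Int) : List (List Int) :=
  PySem.List.slice l (some n) none ++ PySem.List.slice l none (some n)

-- the body of A's for-loop: remove [i] from master, store the row, rotate master by -1
def pvBodyA (st : List (List Int) × List (List (List Int))) (i : Int) :
    List (List Int) × List (List (List Int)) :=
  let remove_itself := (PySem.List.remove? st.1 [i]).getD st.1
  (pvRotate st.1 (-1), st.2.set i.toNat remove_itself)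

def generate_roommates_mutual_disagreement (num_agents : Option Int) (dim : Int) : List (List (List Int)) :=
  match num_agents with
  | none => []   -- A raises TypeError here; excluded by Pre_
  | some n =>
    let master_list := (PySem.List.pyRange 0 n 1).map (fun i => [n - 1 - i])
    let out := List.replicate n.toNat (List.replicate (n - 1).toNat ([-1] : List Int))
    ((PySem.List.pyRange 0 n 1).foldl pvBodyA (master_list, out)).2

-- ===== PORT B =====
def generate_roommates_mutual_disagreement_alt (num_agents : Option Int) (dim : Int) : List (List (List Int)) :=
  match num_agents with
  | none => []   -- B raises TypeError here; excluded by Pre_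
  | some n =>
    (PySem.List.pyRange 0 n 1).map (fun i =>
      (PySem.List.pyRange 0 (n - 1) 1).map (fun j => [n - 1 - PySem.Int.mod (j - i) n]))

-- ===== PRECONDITION & SPEC =====
-- Pre_ excludes only num_agents = None, where the Python A (and B) raise TypeError.
def Pre_generate_roommates_mutual_disagreement (num_agents : Option Int) (dim : Int) : Prop :=
  num_agents ≠ none
instance (num_agents : Option Int) (dim : Int) : Decidable (Pre_generate_roommates_mutual_disagreement num_agents dim) := by unfold Pre_generate_roommates_mutual_disagreement; infer_instance

def pvWitness_generate_roommates_mutual_disagreement : Option Int × Int := (some 4, 2)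

def Spec_generate_roommates_mutual_disagreement (num_agents : Option Int) (dim : Int) (out : List (List (List Int))) : Prop := out = generate_roommates_mutual_disagreement_alt num_agents dim
instance (num_agents : Option Int) (dim : Int) (out : List (List (List Int))) : Decidable (Spec_generate_roommates_mutual_disagreement num_agents dim out) := by unfold Spec_generate_roommates_mutual_disagreement; infer_instance

-- ===== CLAIM (what is proved, stated in full; the proofs are below) =====
def Claim_equal_generate_roommates_mutual_disagreement : Prop := ∀ (num_agents : Option Int) (dim : Int), Dom_generate_roommates_mutual_disagreement num_agents dim → Pre_generate_roommates_mutual_disagreement num_agents dim → Spec_generate_roommates_mutual_disagreement num_agents dim (generate_roommates_mutual_disagreement num_agents dim)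

-- ===== LEMMAS AND PROOFS =====

-- master_list after k rotations: entry j is [N-1 - ((j-k) mod N)]
def pvRow (N k : Nat) : List (List Int) :=
  (List.range N).map (fun (j : Nat) => [(N : Int) - 1 - PySem.Int.mod ((j : Int) - (k : Int)) (N : Int)])

lemma pvmod (N : Nat) (j k : Int) (hj : 0 ≤ j) (hjN : j < N) (hk : 0 ≤ k) (hkN : k ≤ N) :
    PySem.Int.mod (j - k) (N : Int) = if k ≤ j then j - k else j - k + N := by
  rw [PySem.Int.mod_eq_emod_of_pos (by omega)]
  split
  · exact Int.emod_eq_of_lt (by omega) (by omega)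
  · have h2 : (j - k + (N : Int)) % (N : Int) = (j - k) % (N : Int) := by
      rw [show j - k + (N : Int) = (j - k) + (N : Int) * 1 by ring]
      exact Int.add_mul_emod_self_left _ _ _
    rw [← h2]
    exact Int.emod_eq_of_lt (by omega) (by omega)

lemma pvRow_length (N k : Nat) : (pvRow N k).length = N := by simp [pvRow]

lemma row_split (N k : Nat) (hN : 0 < N) (hk : k < N) :
    pvRow N k = ((List.range (N - 1)).map
        (fun (j : Nat) => [(N : Int) - 1 - PySem.Int.mod ((j : Int) - (k : Int)) (N : Int)])) ++ [[(k : Int)]] := by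
  conv_lhs => rw [pvRow]
  rw [show List.range N = List.range (N - 1) ++ [N - 1] by
        rw [← List.range_succ]; congr 1; omega]
  rw [List.map_append]
  congr 1
  have hval : (N : Int) - 1 - PySem.Int.mod (((N - 1 : Nat) : Int) - (k : Int)) (N : Int) = (k : Int) := by
    rw [pvmod N _ _ (by omega) (by omega) (by omega) (by omega)]
    split <;> omega
  simp [hval]

lemma row_head_split (N k : Nat) (hN : 0 < N) (hk : k < N) :
    pvRow N (k + 1) = [(k : Int)] :: ((List.range (N - 1)).map
        (fun (j : Nat) => [(N : Int) - 1 - PySem.Int.mod ((j : Int) - (k : Int)) (N : Int)])) := by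
  conv_lhs => rw [pvRow]
  rw [show List.range N = 0 :: (List.range (N - 1)).map Nat.succ by
        rw [← List.range_succ_eq_map]; congr 1; omega]
  rw [List.map_cons, List.map_map]
  congr 1
  · have hval : (N : Int) - 1 - PySem.Int.mod (((0 : Nat) : Int) - ((k + 1 : Nat) : Int)) (N : Int) = (k : Int) := by
      rw [pvmod N _ _ (by omega) (by omega) (by omega) (by omega)]
      split <;> omega
    simpa using hval
  · apply List.map_congr_left
    intro j hj
    simp only [Function.comp_apply]
    have harg : ((Nat.succ j : Nat) : Int) - ((k + 1 : Nat) : Int) = (j : Int) - (k : Int) := by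
      push_cast; ring
    rw [harg]

lemma rotate_row (N k : Nat) (hN : 0 < N) (hk : k < N) :
    pvRotate (pvRow N k) (-1) = pvRow N (k + 1) := by
  unfold pvRotate
  rw [PySem.List.slice_from_neg_one, PySem.List.slice_to_neg_one, pvRow_length,
      row_split N k hN hk, row_head_split N k hN hk]
  set front := (List.range (N - 1)).map
      (fun (j : Nat) => [(N : Int) - 1 - PySem.Int.mod ((j : Int) - (k : Int)) (N : Int)]) with hf
  have hfl : front.length = N - 1 := by simp [hf]
  rw [← hfl, List.drop_left, List.dropLast_concat]
  rfl

lemma row_last_not_mem (N k : Nat) (hN : 0 < N) (hk : k < N) :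
    [(k : Int)] ∉ (List.range (N - 1)).map
        (fun (j : Nat) => [(N : Int) - 1 - PySem.Int.mod ((j : Int) - (k : Int)) (N : Int)]) := by
  intro hmem
  simp only [List.mem_map, List.mem_range] at hmem
  obtain ⟨j, hj, hcell⟩ := hmem
  rw [pvmod N _ _ (by omega) (by omega) (by omega) (by omega)] at hcell
  simp only [List.cons.injEq, and_true] at hcell
  split at hcell <;> omega

lemma remove_row (N k : Nat) (hN : 0 < N) (hk : k < N) :
    PySem.List.remove? (pvRow N k) [(k : Int)] = some ((pvRow N k).dropLast) := by
  rw [row_split N k hN hk]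
  have hmem : [(k : Int)] ∈ ((List.range (N - 1)).map
        (fun (j : Nat) => [(N : Int) - 1 - PySem.Int.mod ((j : Int) - (k : Int)) (N : Int)])) ++ [[(k : Int)]] := by
    simp
  rw [PySem.List.remove?_eq_some_erase _ _ hmem,
      List.erase_append_right _ (row_last_not_mem N k hN hk), List.dropLast_concat]
  simp

lemma fold_inv (N : Nat) (hN : 0 < N) :
    ∀ (d k : Nat) (out : List (List (List Int))), k + d = N → out.length = N →
    ((PySem.List.pyRange (k : Int) (N : Int) 1).foldl pvBodyA (pvRow N k, out)).2
      = out.take k ++ ((List.range N).drop k).map (fun i => (pvRow N i).dropLast) := by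
  intro d
  induction d with
  | zero =>
    intro k out hk hout
    rw [show (k : Int) = (N : Int) by omega, PySem.List.pyRange_one_eq_nil le_rfl,
        List.foldl_nil, List.drop_eq_nil_of_le (by simp; omega), List.map_nil,
        List.append_nil, List.take_of_length_le (by omega)]
  | succ d ih =>
    intro k out hk hout
    have hkN : k < N := by omega
    rw [PySem.List.pyRange_one_cons (by exact_mod_cast hkN), List.foldl_cons]
    have hbody : pvBodyA (pvRow N k, out) (k : Int)
        = (pvRow N (k + 1), out.set k ((pvRow N k).dropLast)) := by
      unfold pvBodyA
      simp only [remove_row N k hN hkN, Option.getD_some, Int.toNat_natCast]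
      rw [rotate_row N k hN hkN]
    rw [hbody, show ((k : Int) + 1) = ((k + 1 : Nat) : Int) by push_cast; ring,
        ih (k + 1) _ (by omega) (by simp [hout])]
    have hset : out.set k ((pvRow N k).dropLast)
        = out.take k ++ (pvRow N k).dropLast :: out.drop (k + 1) :=
      List.set_eq_take_cons_drop _ (by omega)
    have htake : (out.set k ((pvRow N k).dropLast)).take (k + 1)
        = out.take k ++ [(pvRow N k).dropLast] := by
      rw [hset, show k + 1 = (out.take k).length + 1 by simp; omega,
          List.take_length_add_append]
      rfl
    have hdropr : (List.range N).drop k = k :: (List.range N).drop (k + 1) := by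
      rw [List.drop_eq_getElem_cons (by simpa using hkN)]
      simp
    rw [htake, hdropr, List.map_cons, List.append_assoc]
    rfl

lemma row_dropLast (N i : Nat) (hN : 0 < N) (hi : i < N) :
    (pvRow N i).dropLast
      = (PySem.List.pyRange 0 ((N : Int) - 1) 1).map
          (fun j => [(N : Int) - 1 - PySem.Int.mod (j - (i : Int)) (N : Int)]) := by
  rw [row_split N i hN hi, List.dropLast_concat, PySem.List.pyRange_one]
  rw [show ((N : Int) - 1 - 0).toNat = N - 1 by omega, List.map_map]
  apply List.map_congr_left
  intro j hj
  simp

-- ===== VERDICT (by name: the statement is the Claim_ definition above) =====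
theorem generate_roommates_mutual_disagreement_spec : Claim_equal_generate_roommates_mutual_disagreement := by
  intro num_agents dim _ hpre
  match num_agents with
  | none => exact absurd rfl hpre
  | some n =>
    unfold Spec_generate_roommates_mutual_disagreement
    simp only [generate_roommates_mutual_disagreement, generate_roommates_mutual_disagreement_alt]
    by_cases hn : 0 < n
    · have hN : n = ((n.toNat : Nat) : Int) := by omega
      have hN0 : 0 < n.toNat := by omega
      set N := n.toNat with hNdef
      rw [hN]
      have hm : (PySem.List.pyRange 0 ((N : Nat) : Int) 1).map (fun i => [((N : Nat) : Int) - 1 - i])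
          = pvRow N 0 := by
        rw [pvRow, PySem.List.pyRange_one, show (((N : Nat) : Int) - 0).toNat = N by omega,
            List.map_map]
        apply List.map_congr_left
        intro j hj
        simp only [List.mem_range] at hj
        simp only [Function.comp_apply, zero_add]
        rw [pvmod N (j : Int) ((0 : Nat) : Int) (by omega) (by omega) (by omega) (by omega),
            if_pos (by omega)]
        simp
      rw [hm]
      have hfold := fold_inv N hN0 N 0
        (List.replicate ((N : Nat) : Int).toNat (List.replicate (((N : Nat) : Int) - 1).toNat ([-1] : List Int)))
        (by omega) (by simp)
      simp only [Nat.cast_zero, Int.toNat_natCast] at hfold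
      rw [hfold]
      simp only [List.take_zero, List.drop_zero, List.nil_append]
      rw [PySem.List.pyRange_one 0 ((N : Nat) : Int), show (((N : Nat) : Int) - 0).toNat = N by omega,
          List.map_map]
      apply List.map_congr_left
      intro i hi
      simp only [List.mem_range] at hi
      simp only [Function.comp_apply, zero_add]
      rw [row_dropLast N i hN0 hi]
    · rw [PySem.List.pyRange_one_eq_nil (by omega), List.foldl_nil]
      simp [show n.toNat = 0 by omega]
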